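-- pv_equiv track=rewrite | github.com/Umer-prog/CleanSheet-App | ui/screen1_sources.py | validate_confirm_requirements
-- ===== SOURCE A (Python) =====
-- def validate_confirm_requirements(
--     source_rows: list[dict],
--     existing_tx: list | None = None,
--     existing_dim: list | None = None,
-- ) -> str | None:
--     existing_tx = existing_tx or []
--     existing_dim = existing_dim or []
--
--     if not source_rows and not existing_tx and not existing_dim:
--         return "Add at least one file before continuing."
--
--     tx_count = len(existing_tx)
--     dim_count = len(existing_dim)
--
--     for source in source_rows:
--         for sheet in source.get("sheets", []):
--             category = str(sheet.get("category", "")).strip()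
--             if category == "Transaction":
--                 tx_count += 1
--             elif category == "Dimension":
--                 dim_count += 1
--             else:
--                 return "Every selected sheet must have a category."
--
--     if tx_count == 0:
--         return "At least one transaction sheet is required."
--     if dim_count == 0:
--         return "At least one dimension sheet is required."
--     return None
-- ===== SOURCE B (Python) =====
-- def validate_confirm_requirements(
--     source_rows: list[dict],
--     existing_tx: list | None = None,
--     existing_dim: list | None = None,
-- ) -> str | None:
--     if not source_rows and not existing_tx and not existing_dim:
--         return "Add at least one file before continuing."
--
--     cats = [
--         str(sheet.get("category", "")).strip()
--         for source in source_rows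
--         for sheet in source.get("sheets", [])
--     ]
--     if any(c not in ("Transaction", "Dimension") for c in cats):
--         return "Every selected sheet must have a category."
--     if len(existing_tx or []) + cats.count("Transaction") == 0:
--         return "At least one transaction sheet is required."
--     if len(existing_dim or []) + cats.count("Dimension") == 0:
--         return "At least one dimension sheet is required."
--     return None
-- ===== Notes on version B (the rewrite author's own statement) =====
-- stated objective: simpler
-- what changed: Replaces A's interleaved counting loop with early return by a flat comprehension of stripped categories followed by one validity check (any) and two count-based zero checks; safe because every invalid sheet yields the same error message.
import Mathlib
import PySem

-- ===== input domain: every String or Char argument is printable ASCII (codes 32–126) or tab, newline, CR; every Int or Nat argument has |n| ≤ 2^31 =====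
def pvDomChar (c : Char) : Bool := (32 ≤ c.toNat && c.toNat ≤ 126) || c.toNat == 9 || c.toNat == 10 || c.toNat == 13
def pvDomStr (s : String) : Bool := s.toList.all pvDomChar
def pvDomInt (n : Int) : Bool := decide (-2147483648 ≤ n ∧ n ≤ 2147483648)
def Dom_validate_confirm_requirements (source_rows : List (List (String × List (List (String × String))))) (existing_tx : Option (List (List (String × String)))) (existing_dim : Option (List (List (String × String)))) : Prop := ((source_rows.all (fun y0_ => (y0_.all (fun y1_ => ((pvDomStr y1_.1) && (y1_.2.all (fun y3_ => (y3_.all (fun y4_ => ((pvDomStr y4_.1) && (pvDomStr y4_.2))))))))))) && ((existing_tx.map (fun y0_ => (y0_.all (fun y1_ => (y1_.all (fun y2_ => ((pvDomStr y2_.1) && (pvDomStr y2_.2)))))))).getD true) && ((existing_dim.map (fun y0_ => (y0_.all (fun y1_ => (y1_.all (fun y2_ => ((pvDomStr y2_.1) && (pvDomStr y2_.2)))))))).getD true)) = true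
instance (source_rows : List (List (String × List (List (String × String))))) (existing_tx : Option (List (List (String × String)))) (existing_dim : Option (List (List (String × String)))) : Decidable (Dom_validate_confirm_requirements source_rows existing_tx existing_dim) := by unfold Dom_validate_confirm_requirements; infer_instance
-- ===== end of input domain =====

-- B replaces A's interleaved counting loop (with early return) by a flat list of stripped
-- categories, one validity check and two count-based zero checks: simpler decomposition, same cost.


-- shared primitive: Python dict .get(k, dflt) on an association list (first match)
def pyDictGetD {α : Type} (l : List (String × α)) (k : String) (dflt : α) : α :=
  match l.find? (fun p => p.1 == k) with
  | some p => p.2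
  | none => dflt

-- ===== PORT A =====
-- inner loop over source.get("sheets", []): counts, or early-returns (none = error message)
def vcrSheets : List (List (String × String)) → Nat → Nat → Option (Nat × Nat)
  | [], tx, dim => some (tx, dim)
  | sheet :: rest, tx, dim =>
    let category := PySem.Str.strip (pyDictGetD sheet "category" "")
    if category = "Transaction" then vcrSheets rest (tx + 1) dim
    else if category = "Dimension" then vcrSheets rest tx (dim + 1)
    else none

def vcrSources : List (List (String × List (List (String × String)))) → Nat → Nat → Option (Nat × Nat)
  | [], tx, dim => some (tx, dim)
  | src :: rest, tx, dim =>
    match vcrSheets (pyDictGetD src "sheets" []) tx dim with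
    | none => none
    | some (tx', dim') => vcrSources rest tx' dim'

def validate_confirm_requirements (source_rows : List (List (String × List (List (String × String))))) (existing_tx : Option (List (List (String × String)))) (existing_dim : Option (List (List (String × String)))) : Option String :=
  let etx := existing_tx.getD []
  let edim := existing_dim.getD []
  if source_rows = [] ∧ etx = [] ∧ edim = [] then
    some "Add at least one file before continuing."
  else
    match vcrSources source_rows etx.length edim.length with
    | none => some "Every selected sheet must have a category."
    | some (tx, dim) =>
      if tx = 0 then some "At least one transaction sheet is required."
      else if dim = 0 then some "At least one dimension sheet is required."
      else none

-- ===== PORT B =====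
def catOf (sheet : List (String × String)) : String :=
  PySem.Str.strip (pyDictGetD sheet "category" "")

def validate_confirm_requirements_alt (source_rows : List (List (String × List (List (String × String))))) (existing_tx : Option (List (List (String × String)))) (existing_dim : Option (List (List (String × String)))) : Option String :=
  if source_rows = [] ∧ existing_tx.getD [] = [] ∧ existing_dim.getD [] = [] then
    some "Add at least one file before continuing."
  else
    let cats := source_rows.flatMap (fun src => (pyDictGetD src "sheets" []).map catOf)
    if cats.any (fun c => !(c == "Transaction" || c == "Dimension")) then
      some "Every selected sheet must have a category."
    else if (existing_tx.getD []).length + cats.count "Transaction" = 0 then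
      some "At least one transaction sheet is required."
    else if (existing_dim.getD []).length + cats.count "Dimension" = 0 then
      some "At least one dimension sheet is required."
    else none

-- ===== PRECONDITION & SPEC =====
def Spec_validate_confirm_requirements (source_rows : List (List (String × List (List (String × String))))) (existing_tx : Option (List (List (String × String)))) (existing_dim : Option (List (List (String × String)))) (out : Option String) : Prop := out = validate_confirm_requirements_alt source_rows existing_tx existing_dim
instance (source_rows : List (List (String × List (List (String × String))))) (existing_tx : Option (List (List (String × String)))) (existing_dim : Option (List (List (String × String)))) (out : Option String) : Decidable (Spec_validate_confirm_requirements source_rows existing_tx existing_dim out) := by unfold Spec_validate_confirm_requirements; infer_instance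

-- ===== CLAIM (what is proved, stated in full; the proofs are below) =====
def Claim_equal_validate_confirm_requirements : Prop := ∀ (source_rows : List (List (String × List (List (String × String))))) (existing_tx : Option (List (List (String × String)))) (existing_dim : Option (List (List (String × String)))), Dom_validate_confirm_requirements source_rows existing_tx existing_dim → Spec_validate_confirm_requirements source_rows existing_tx existing_dim (validate_confirm_requirements source_rows existing_tx existing_dim)

-- ===== LEMMAS AND PROOFS =====

-- A's loop, flattened to a loop over the category strings alone
def catLoop : List String → Nat → Nat → Option (Nat × Nat)
  | [], tx, dim => some (tx, dim)
  | c :: rest, tx, dim =>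
    if c = "Transaction" then catLoop rest (tx + 1) dim
    else if c = "Dimension" then catLoop rest tx (dim + 1)
    else none

theorem vcrSheets_eq_catLoop (sheets : List (List (String × String))) (tx dim : Nat) :
    vcrSheets sheets tx dim = catLoop (sheets.map catOf) tx dim := by
  induction sheets generalizing tx dim with
  | nil => rfl
  | cons s rest ih =>
    simp only [vcrSheets, List.map_cons, catLoop, catOf]
    split_ifs <;> simp [ih]

theorem catLoop_append (l1 l2 : List String) (tx dim : Nat) :
    catLoop (l1 ++ l2) tx dim = (catLoop l1 tx dim).bind (fun p => catLoop l2 p.1 p.2) := by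
  induction l1 generalizing tx dim with
  | nil => rfl
  | cons c rest ih =>
    simp only [List.cons_append, catLoop]
    split_ifs <;> simp [ih]

theorem vcrSources_eq_catLoop (srcs : List (List (String × List (List (String × String))))) (tx dim : Nat) :
    vcrSources srcs tx dim
      = catLoop (srcs.flatMap (fun src => (pyDictGetD src "sheets" []).map catOf)) tx dim := by
  induction srcs generalizing tx dim with
  | nil => rfl
  | cons src rest ih =>
    simp only [vcrSources, List.flatMap_cons, catLoop_append, vcrSheets_eq_catLoop]
    cases catLoop ((pyDictGetD src "sheets" []).map catOf) tx dim with
    | none => rfl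
    | some p => simp [ih]

theorem catLoop_char (cats : List String) (tx dim : Nat) :
    catLoop cats tx dim
      = if cats.any (fun c => !(c == "Transaction" || c == "Dimension")) then none
        else some (tx + cats.count "Transaction", dim + cats.count "Dimension") := by
  induction cats generalizing tx dim with
  | nil => simp [catLoop]
  | cons c rest ih =>
    simp only [catLoop, List.any_cons, List.count_cons]
    by_cases h1 : c = "Transaction"
    · subst h1
      simp [ih]
      split_ifs with h <;> simp [Nat.add_comm, Nat.add_left_comm]
    · by_cases h2 : c = "Dimension"
      · subst h2
        simp [ih, h1]
        split_ifs with h <;> simp [Nat.add_comm, Nat.add_left_comm]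
      · simp [h1, h2]

-- ===== VERDICT (by name: the statement is the Claim_ definition above) =====
theorem validate_confirm_requirements_spec : Claim_equal_validate_confirm_requirements := by
  intro source_rows existing_tx existing_dim _
  unfold Spec_validate_confirm_requirements
  unfold validate_confirm_requirements validate_confirm_requirements_alt
  simp only [vcrSources_eq_catLoop, catLoop_char]
  by_cases hg : source_rows = [] ∧ existing_tx.getD [] = [] ∧ existing_dim.getD [] = []
  · simp [hg]
  · simp only [if_neg hg]
    split_ifs with hv h2 h3
    · rfl
    · simp [h2]
    · simp [h2, h3]
      intro h
      simp [h] at h2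
      omega
    · simp [h2, h3]
      split_ifs with p q
      · exact absurd (by simp [p.1, p.2]) h2
      · exact absurd (by simp [q.1, q.2]) h3
      · rfl
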